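-- pv_equiv track=rewrite | github.com/tanzim-rahman/wgs-pipeline | bin/phoenix/q30.py | qual_stat
-- ===== SOURCE A (Python) =====
-- def qual_stat(qstr):
--     q20 = 0
--     q30 = 0
--     for q in qstr:
--         qual = ord(q) - 33
--         #qual = ord(q) - 33 #python2 version
--         if qual >= 30:
--             q30 += 1
--             q20 += 1
--         elif qual >= 20:
--             q20 += 1
--     return q20, q30
-- ===== SOURCE B (Python) =====
-- def qual_stat(qstr):
--     # Histogram first, then sum counts over distinct characters (one branch per symbol, not per char).
--     hist = {}
--     for ch in qstr:
--         hist[ch] = hist.get(ch, 0) + 1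
--     q20 = sum(n for ch, n in hist.items() if ord(ch) >= 53)
--     q30 = sum(n for ch, n in hist.items() if ord(ch) >= 63)
--     return q20, q30
-- ===== Notes on version B (the rewrite author's own statement) =====
-- stated objective: alternative
-- what changed: Replaces per-character threshold branching with a frequency histogram built once, then sums the counts of the distinct characters whose ord meets each threshold (ord>=53 for q20, ord>=63 for q30).
import Mathlib
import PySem

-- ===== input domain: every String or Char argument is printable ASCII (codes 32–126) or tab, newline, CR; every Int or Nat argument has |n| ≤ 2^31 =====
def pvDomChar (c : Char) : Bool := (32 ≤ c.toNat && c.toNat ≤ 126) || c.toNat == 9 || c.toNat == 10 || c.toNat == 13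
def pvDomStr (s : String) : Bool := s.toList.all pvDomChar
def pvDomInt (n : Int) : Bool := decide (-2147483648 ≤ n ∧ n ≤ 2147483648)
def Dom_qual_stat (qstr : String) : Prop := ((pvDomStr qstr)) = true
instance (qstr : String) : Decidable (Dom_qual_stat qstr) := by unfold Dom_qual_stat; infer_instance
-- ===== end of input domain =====

-- B builds a character histogram once and sums counts over the distinct symbols per threshold; same result, per-symbol instead of per-character branching.

-- ===== PORT A =====
def qual_stat (qstr : String) : Int × Int :=
  let r := qstr.toList.foldl (fun (acc : Int × Int) q =>
    let qual : Int := (q.toNat : Int) - 33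
    if 30 ≤ qual then (acc.1 + 1, acc.2 + 1)
    else if 20 ≤ qual then (acc.1 + 1, acc.2)
    else acc) (0, 0)
  (r.1, r.2)

-- ===== PORT B =====
def qual_stat_alt (qstr : String) : Int × Int :=
  let hist : PySem.Dict Char Int :=
    qstr.toList.foldl (fun d ch => d.insert ch (d.getD ch 0 + 1)) PySem.Dict.empty
  let q20 := ((hist.items.filter (fun p => 53 ≤ (p.1.toNat : Int))).map (·.2)).sum
  let q30 := ((hist.items.filter (fun p => 63 ≤ (p.1.toNat : Int))).map (·.2)).sum
  (q20, q30)

-- ===== PRECONDITION & SPEC =====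
def Spec_qual_stat (qstr : String) (out : Int × Int) : Prop := out = qual_stat_alt qstr
instance (qstr : String) (out : Int × Int) : Decidable (Spec_qual_stat qstr out) := by unfold Spec_qual_stat; infer_instance

-- ===== CLAIM (what is proved, stated in full; the proofs are below) =====
def Claim_equal_qual_stat : Prop := ∀ (qstr : String), Dom_qual_stat qstr → Spec_qual_stat qstr (qual_stat qstr)

-- ===== LEMMAS AND PROOFS =====

-- indicator sum over a nodup list
theorem sum_indicator_nodup (x : Char) (l : List Char) (hnd : l.Nodup) :
    (l.map (fun k => if x = k then (1 : Int) else 0)).sum = if x ∈ l then 1 else 0 := by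
  induction l with
  | nil => simp
  | cons k t ih =>
    rcases List.nodup_cons.mp hnd with ⟨hk, ht⟩
    by_cases hx : x = k
    · subst hx
      simp [List.sum_cons, ih ht, hk]
    · simp [List.sum_cons, hx, ih ht]

-- summing counts of keys satisfying p over a nodup key list covering xs equals countP p xs
theorem sum_counts_eq_countP (p : Char → Bool) (ks : List Char) (hnd : ks.Nodup)
    (xs : List Char) (hmem : ∀ x ∈ xs, x ∈ ks) :
    ((ks.filter p).map (fun k => ((xs.count k : Nat) : Int))).sum = (xs.countP p : Int) := by
  induction xs with
  | nil => simp
  | cons x t ih =>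
    have hxk : x ∈ ks := hmem x (by simp)
    have hmem' : ∀ y ∈ t, y ∈ ks := fun y hy => hmem y (by simp [hy])
    have hcount : ∀ k, (((x :: t).count k : Nat) : Int)
        = ((t.count k : Nat) : Int) + (if x = k then (1 : Int) else 0) := by
      intro k
      by_cases h : x = k
      · subst h; simp
      · have : ¬ (k = x) := fun h' => h h'.symm
        simp [h]
    calc ((ks.filter p).map (fun k => (((x :: t).count k : Nat) : Int))).sum
        = ((ks.filter p).map (fun k => ((t.count k : Nat) : Int) + (if x = k then (1:Int) else 0))).sum := by
          simp only [hcount]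
      _ = ((ks.filter p).map (fun k => ((t.count k : Nat) : Int))).sum
            + ((ks.filter p).map (fun k => if x = k then (1:Int) else 0)).sum := by
          rw [← List.sum_map_add]
      _ = (t.countP p : Int) + (if x ∈ ks.filter p then 1 else 0) := by
          rw [ih hmem', sum_indicator_nodup x (ks.filter p) (hnd.filter p)]
      _ = ((x :: t).countP p : Int) := by
          by_cases hp : p x = true
          · simp [hp, List.mem_filter, hxk]
          · simp [hp, List.mem_filter]

-- A's fold computes the two countPs
theorem foldA_eq (xs : List Char) (a b : Int) :
    xs.foldl (fun (acc : Int × Int) q =>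
      let qual : Int := (q.toNat : Int) - 33
      if 30 ≤ qual then (acc.1 + 1, acc.2 + 1)
      else if 20 ≤ qual then (acc.1 + 1, acc.2)
      else acc) (a, b)
    = (a + (xs.countP (fun q => decide (53 ≤ (q.toNat : Int))) : Int),
       b + (xs.countP (fun q => decide (63 ≤ (q.toNat : Int))) : Int)) := by
  induction xs generalizing a b with
  | nil => simp
  | cons x t ih =>
    simp only [List.foldl_cons, List.countP_cons]
    by_cases h30 : (30 : Int) ≤ (x.toNat : Int) - 33
    · have h53 : (53 : Int) ≤ (x.toNat : Int) := by omega
      have h63 : (63 : Int) ≤ (x.toNat : Int) := by omega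
      simp only [h30, if_pos, ih]
      simp [h53, h63]; constructor <;> ring
    · by_cases h20 : (20 : Int) ≤ (x.toNat : Int) - 33
      · have h53 : (53 : Int) ≤ (x.toNat : Int) := by omega
        have h63 : ¬ (63 : Int) ≤ (x.toNat : Int) := by omega
        simp only [h30, if_neg, not_false_iff, h20, if_pos, ih]
        simp [h53, h63]; ring
      · have h53 : ¬ (53 : Int) ≤ (x.toNat : Int) := by omega
        have h63 : ¬ (63 : Int) ≤ (x.toNat : Int) := by omega
        simp only [h30, h20, if_neg, not_false_iff, ih]
        simp [h53, h63]

-- B's histogram sum equals countP p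
theorem altSum_eq (xs : List Char) (p : Char → Bool) :
    ((((xs.foldl (fun d ch => d.insert ch (d.getD ch 0 + 1)) PySem.Dict.empty).items.filter
        (fun q => p q.1)).map (·.2)).sum) = (xs.countP p : Int) := by
  rw [PySem.Dict.foldl_insert_getD_add_one_eq_counter, PySem.Dict.items_counter]
  rw [List.filter_map, List.map_map]
  have h1 : ((fun (q : Char × Int) => p q.1) ∘ fun k => (k, (xs.count k : Int))) = p := rfl
  have h2 : ((fun (q : Char × Int) => q.2) ∘ fun k => (k, (xs.count k : Int)))
      = fun k => ((xs.count k : Nat) : Int) := rfl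
  rw [h1, h2]
  exact sum_counts_eq_countP p (PySem.Set.ofList xs) (PySem.Set.nodup_ofList xs) xs
    (fun x hx => (PySem.Set.mem_ofList xs x).mpr hx)

-- ===== VERDICT (by name: the statement is the Claim_ definition above) =====
theorem qual_stat_spec : Claim_equal_qual_stat := by
  intro qstr _
  unfold Spec_qual_stat qual_stat qual_stat_alt
  simp only [foldA_eq]
  rw [altSum_eq qstr.toList (fun k => decide (53 ≤ (k.toNat : Int))),
      altSum_eq qstr.toList (fun k => decide (63 ≤ (k.toNat : Int)))]
  simp
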